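-- pv_equiv track=rewrite | github.com/rajamii/excise_backend | utils/simple_pdf.py | paginate_lines
-- ===== SOURCE A (Python) =====
-- from typing import Iterable
--
-- def _wrap_line(text: str, max_chars: int) -> list[str]:
--     text = str(text or "").strip()
--     if not text:
--         return [""]
--     if len(text) <= max_chars:
--         return [text]
--
--     words = text.split()
--     lines: list[str] = []
--     current = ""
--     for w in words:
--         if not current:
--             current = w
--             continue
--         if len(current) + 1 + len(w) <= max_chars:
--             current = f"{current} {w}"
--         else:
--             lines.append(current)
--             current = w
--     if current:
--         lines.append(current)
--     return lines or [text[:max_chars]]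
--
-- def paginate_lines(lines: Iterable[str], max_chars: int = 95, lines_per_page: int = 52) -> list[list[str]]:
--     wrapped: list[str] = []
--     for line in lines:
--         for part in _wrap_line(line, max_chars=max_chars):
--             wrapped.append(part)
--     pages: list[list[str]] = []
--     for i in range(0, len(wrapped), lines_per_page):
--         pages.append(wrapped[i : i + lines_per_page])
--     return pages or [[]]
-- ===== SOURCE B (Python) =====
-- def _wrap_line(text: str, max_chars: int) -> list[str]:
--     text = str(text or "").strip()
--     if not text:
--         return [""]
--     if len(text) <= max_chars:
--         return [text]
--
--     words = text.split()
--     lines: list[str] = []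
--     current = ""
--     for w in words:
--         if not current:
--             current = w
--             continue
--         if len(current) + 1 + len(w) <= max_chars:
--             current = f"{current} {w}"
--         else:
--             lines.append(current)
--             current = w
--     if current:
--         lines.append(current)
--     return lines or [text[:max_chars]]
--
--
-- def paginate_lines(lines, max_chars: int = 95, lines_per_page: int = 52) -> list[list[str]]:
--     # Single streaming pass: wrap and page at the same time, no intermediate
--     # flattened list and no slicing pass.
--     pages: list[list[str]] = []
--     current_page: list[str] = []
--     for line in lines:
--         for part in _wrap_line(line, max_chars=max_chars):
--             current_page.append(part)
--             if len(current_page) == lines_per_page: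
--                 pages.append(current_page)
--                 current_page = []
--     if current_page:
--         pages.append(current_page)
--     return pages or [[]]
-- ===== Notes on version B (the rewrite author's own statement) =====
-- stated objective: alternative
-- what changed: B fuses wrapping and paging into one streaming pass that maintains a current page and flushes it when full, instead of A's flatten-everything-then-slice-with-range two-phase approach.
-- outside the precondition, e.g. on paginate_lines(['a'], 5, -1): A returns [[]], B returns [['a']]
import Mathlib
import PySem

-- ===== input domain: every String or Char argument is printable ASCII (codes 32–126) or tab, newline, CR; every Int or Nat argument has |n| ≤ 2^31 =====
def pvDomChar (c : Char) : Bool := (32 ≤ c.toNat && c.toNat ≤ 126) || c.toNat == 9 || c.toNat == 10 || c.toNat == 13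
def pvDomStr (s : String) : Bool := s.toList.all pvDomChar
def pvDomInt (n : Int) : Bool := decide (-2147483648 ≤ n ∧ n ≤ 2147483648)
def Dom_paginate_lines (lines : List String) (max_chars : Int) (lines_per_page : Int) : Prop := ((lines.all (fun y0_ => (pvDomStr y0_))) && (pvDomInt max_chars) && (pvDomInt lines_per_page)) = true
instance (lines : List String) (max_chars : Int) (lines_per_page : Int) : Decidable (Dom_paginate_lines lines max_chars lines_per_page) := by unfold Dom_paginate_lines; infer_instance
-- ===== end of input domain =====

-- B fuses wrapping and paging into one streaming pass (a current page flushed when full)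
-- instead of A's flatten-everything-then-slice-with-range two-phase approach.

-- ===== PORT A =====
-- shared helper: literal port of the module's _wrap_line (both Pythons contain it verbatim)
def wrapLine (text : String) (max_chars : Int) : List String :=
  let t := PySem.Str.strip text          -- str(text or "").strip(): '' stays '' through strip
  if t = "" then [""]
  else if PySem.Str.len t ≤ max_chars then [t]
  else
    let words := PySem.Str.split₀ t
    let st := words.foldl (fun (st : List String × String) w =>
        if st.2 = "" then (st.1, w)
        else if PySem.Str.len st.2 + 1 + PySem.Str.len w ≤ max_chars then (st.1, st.2 ++ " " ++ w)
        else (st.1 ++ [st.2], w)) ([], "")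
    let ls := if st.2 = "" then st.1 else st.1 ++ [st.2]
    if ls = [] then [PySem.Str.slice t none (some max_chars)] else ls

def paginate_lines (lines : List String) (max_chars : Int) (lines_per_page : Int) : List (List String) :=
  let wrapped := lines.foldl (fun acc line => acc ++ wrapLine line max_chars) []
  let pages := (PySem.List.pyRange 0 (wrapped.length : Int) lines_per_page).foldl
      (fun pages i => pages ++ [PySem.List.slice wrapped (some i) (some (i + lines_per_page))]) []
  if pages = [] then [[]] else pages

-- ===== PORT B =====
def paginate_lines_alt (lines : List String) (max_chars : Int) (lines_per_page : Int) : List (List String) :=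
  let st := lines.foldl (fun st line =>
      (wrapLine line max_chars).foldl (fun (st : List (List String) × List String) part =>
        let cur := st.2 ++ [part]
        if ((cur.length : Int) = lines_per_page) then (st.1 ++ [cur], ([] : List String))
        else (st.1, cur)) st)
    (([] : List (List String)), ([] : List String))
  let pages := if st.2 = [] then st.1 else st.1 ++ [st.2]
  if pages = [] then [[]] else pages

-- ===== PRECONDITION & SPEC =====
-- Pre_ excludes lines_per_page ≤ 0: at 0 Python A raises ValueError (range step 0); for
-- negative values A returns a single empty page — range with a negative step is empty, an
-- artefact of the slicing pass that silently drops all content — while B's streaming pass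
-- keeps the content.
def Pre_paginate_lines (lines : List String) (max_chars : Int) (lines_per_page : Int) : Prop :=
  0 < lines_per_page
instance (lines : List String) (max_chars : Int) (lines_per_page : Int) : Decidable (Pre_paginate_lines lines max_chars lines_per_page) := by unfold Pre_paginate_lines; infer_instance

def pvWitness_paginate_lines : List String × Int × Int := (["hello world", "", "a b c"], 5, 2)

def Spec_paginate_lines (lines : List String) (max_chars : Int) (lines_per_page : Int) (out : List (List String)) : Prop := out = paginate_lines_alt lines max_chars lines_per_page
instance (lines : List String) (max_chars : Int) (lines_per_page : Int) (out : List (List String)) : Decidable (Spec_paginate_lines lines max_chars lines_per_page out) := by unfold Spec_paginate_lines; infer_instance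

-- ===== CLAIM (what is proved, stated in full; the proofs are below) =====
def Claim_equal_paginate_lines : Prop := ∀ (lines : List String) (max_chars : Int) (lines_per_page : Int), Dom_paginate_lines lines max_chars lines_per_page → Pre_paginate_lines lines max_chars lines_per_page → Spec_paginate_lines lines max_chars lines_per_page (paginate_lines lines max_chars lines_per_page)


-- ===== LEMMAS AND PROOFS =====

-- the chunking both ports compute on the flattened wrapped lines: greedy chunks of k lines
def chunksRec {α : Type} (k : Nat) : List α → List (List α)
  | [] => []
  | w :: rest => (w :: rest.take (k - 1)) :: chunksRec k (rest.drop (k - 1))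
termination_by ws => ws.length
decreasing_by simp

theorem pyRange_pos_cons (a b s : Int) (hs : 0 < s) (hab : a < b) :
    PySem.List.pyRange a b s = a :: PySem.List.pyRange (a + s) b s := by
  rw [PySem.List.pyRange_of_pos _ _ hs, PySem.List.pyRange_of_pos _ _ hs]
  rw [if_pos hab]
  have hq0 : 0 ≤ (b - a - 1) / s := Int.ediv_nonneg (by omega) (by omega)
  rw [show b - a + s - 1 = b - a - 1 + 1 * s by ring,
      Int.add_mul_ediv_right _ _ (show s ≠ 0 by omega)]
  rw [show ((b - a - 1) / s + 1).toNat = ((b - a - 1) / s).toNat + 1 by omega,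
      List.range_succ_eq_map]
  by_cases h2 : a + s < b
  · rw [if_pos h2, show (b - (a + s) + s - 1) = b - a - 1 by ring]
    simp only [List.map_cons, List.map_map]
    congr 1
    · simp
    apply List.map_congr_left
    intro k _
    simp only [Function.comp_apply, Nat.succ_eq_add_one]
    push_cast; ring
  · rw [if_neg h2]
    have : (b - a - 1) / s = 0 := Int.ediv_eq_zero_of_lt (by omega) (by omega)
    simp [this]

-- A's slicing pass over range(0, len, k) computes the greedy chunks
theorem chunkA_aux (k : Int) (hk : 0 < k) (full : List String) :
    ∀ n (ws : List String) (a : Int), ws.length = n → 0 ≤ a → full.drop a.toNat = ws →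
      (PySem.List.pyRange a (full.length : Int) k).map
        (fun i => PySem.List.slice full (some i) (some (i + k))) = chunksRec k.toNat ws := by
  intro n
  induction n using Nat.strong_induction_on with
  | _ n ih =>
    intro ws a hlen ha hdrop
    match ws, hlen with
    | [], hlen =>
      have h0 : full.length - a.toNat = 0 := by simpa using congrArg List.length hdrop
      have : ¬ (a < (full.length : Int)) := by omega
      rw [PySem.List.pyRange_of_pos _ _ hk, if_neg this]
      simp [chunksRec]
    | w :: rest, hlen =>
      have hlenws : full.length - a.toNat = rest.length + 1 := by
        simpa using congrArg List.length hdrop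
      have hltI : a < (full.length : Int) := by omega
      rw [pyRange_pos_cons _ _ _ hk hltI, List.map_cons]
      have hhead : PySem.List.slice full (some a) (some (a + k)) = (w :: rest).take k.toNat := by
        rw [PySem.List.slice_toNat _ ha (by omega), hdrop]
        congr 1; omega
      have hdrop' : full.drop (a + k).toNat = (w :: rest).drop k.toNat := by
        rw [← hdrop, List.drop_drop]
        congr 1; omega
      have hrec := ih ((w :: rest).drop k.toNat).length
        (by rw [← hlen]; simp; omega) ((w :: rest).drop k.toNat) (a + k) rfl (by omega) hdrop'
      rw [hhead, hrec]
      rw [chunksRec]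
      have hk1 : k.toNat = (k.toNat - 1) + 1 := by omega
      have h1 : (w :: rest).take k.toNat = w :: rest.take (k.toNat - 1) := by
        rw [hk1, List.take_succ_cons]; simp
      have h2 : (w :: rest).drop k.toNat = rest.drop (k.toNat - 1) := by
        rw [hk1, List.drop_succ_cons]; simp
      rw [h1, h2]

theorem chunksRec_cons_of_full {α : Type} (k : Nat) (c : List α) (rest : List α)
    (hc : c ≠ []) (hlen : c.length = k) :
    chunksRec k (c ++ rest) = c :: chunksRec k rest := by
  match c, hc with
  | c0 :: t, _ =>
    rw [List.cons_append, chunksRec]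
    have hkt : k - 1 = t.length := by simp at hlen; omega
    rw [hkt]
    simp

-- B's streaming pass with a partially filled current page computes the greedy chunks
theorem chunkB_aux (k : Int) (hk : 0 < k) :
    ∀ (ws : List String) (ps : List (List String)) (cur : List String), cur.length < k.toNat →
      (let st := ws.foldl (fun (st : List (List String) × List String) part =>
          if ((st.2 ++ [part]).length : Int) = k then (st.1 ++ [st.2 ++ [part]], ([] : List String))
          else (st.1, st.2 ++ [part])) (ps, cur)
       if st.2 = [] then st.1 else st.1 ++ [st.2]) = ps ++ chunksRec k.toNat (cur ++ ws) := by
  intro ws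
  induction ws with
  | nil =>
    intro ps cur hlen
    match cur with
    | [] => simp [chunksRec]
    | c :: t =>
      simp only [List.foldl_nil, List.append_nil]
      rw [if_neg (List.cons_ne_nil _ _), chunksRec]
      have h1 : t.take (k.toNat - 1) = t := List.take_of_length_le (by simp at hlen; omega)
      have h2 : t.drop (k.toNat - 1) = [] := List.drop_eq_nil_of_le (by simp at hlen; omega)
      rw [h1, h2]
      simp [chunksRec]
  | cons w rest ih =>
    intro ps cur hlen
    simp only [List.foldl_cons]
    by_cases h : ((cur ++ [w]).length : Int) = k
    · rw [if_pos h]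
      rw [ih (ps ++ [cur ++ [w]]) [] (by simp; omega)]
      have : cur ++ w :: rest = (cur ++ [w]) ++ rest := by simp
      rw [this, chunksRec_cons_of_full k.toNat (cur ++ [w]) rest (by simp) (by simp at h; simp; omega)]
      simp
    · rw [if_neg h]
      rw [ih ps (cur ++ [w]) (by simp at h; simp; omega)]
      congr 2
      simp

theorem foldl_foldl_flatMap {α β γ : Type} (g : α → List β) (f : γ → β → γ) :
    ∀ (l : List α) (init : γ),
      l.foldl (fun acc x => (g x).foldl f acc) init = (l.flatMap g).foldl f init := by
  intro l
  induction l with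
  | nil => intro init; simp
  | cons x xs ih => intro init; simp [List.foldl_append, ih]

-- ===== VERDICT (by name: the statement is the Claim_ definition above) =====
theorem paginate_lines_spec : Claim_equal_paginate_lines := by
  intro lines max_chars lpp _ hpre
  have hk : 0 < lpp := hpre
  unfold Spec_paginate_lines
  simp only [paginate_lines, paginate_lines_alt]
  rw [foldl_foldl_flatMap]
  rw [PySem.List.foldl_append_singleton_eq_map]
  rw [PySem.List.foldl_append_eq_flatMap]
  simp only [List.nil_append]
  rw [chunkA_aux lpp hk _ (lines.flatMap fun line => wrapLine line max_chars).length
      (lines.flatMap fun line => wrapLine line max_chars) 0 rfl le_rfl (by simp)]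
  have hB := chunkB_aux lpp hk (lines.flatMap fun line => wrapLine line max_chars) [] []
      (by simp; omega)
  simp only [List.nil_append] at hB
  rw [hB]
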